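-- pv_equiv track=rewrite | github.com/lm23aaa/dsa2-exercises | exercises/5-1/knapsack.py | knapsack_bruteforce
-- ===== SOURCE A (Python) =====
-- def powerset(s):
--     if not s:
--         return [[]]
--     first = s[0]
--     rest = powerset(s[1:])
--     with_first = [[first] + r for r in rest]
--     return rest + with_first
--
-- def knapsack_bruteforce(weight_capacity: int, items: list[tuple[str, int]]) -> tuple[list[tuple[str, int]], list[int]]:
--     output_item_lists = []
--     output_count_list = []
--
--     for list in powerset(items):
--         count = 0
--
--         for item in list:
--             (title, weight) = item
--             count += weight
--
--         if count <= weight_capacity and count > 0: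
--             output_item_lists.append(list)
--             output_count_list.append(count)
--
--     return (output_item_lists, output_count_list)
-- ===== SOURCE B (Python) =====
-- def knapsack_bruteforce(weight_capacity: int, items: list[tuple[str, int]]) -> tuple[list[tuple[str, int]], list[int]]:
--     # Build all (subset, weight) pairs incrementally, carrying weights along,
--     # then filter and unzip in two staged passes.
--     pairs = [([], 0)]
--     for title, weight in reversed(items):
--         pairs = pairs + [([(title, weight)] + sub, c + weight) for sub, c in pairs]
--     kept = [(sub, c) for sub, c in pairs if 0 < c <= weight_capacity]
--     return ([sub for sub, _ in kept], [c for _, c in kept])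
-- ===== Notes on version B (the rewrite author's own statement) =====
-- stated objective: simpler
-- what changed: Replaces the recursive powerset helper plus per-subset inner weight loop with one incremental pass that grows a list of (subset, weight) pairs over the reversed items, then a filter and an unzip; no recursion and no re-summing of each subset.
import Mathlib
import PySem

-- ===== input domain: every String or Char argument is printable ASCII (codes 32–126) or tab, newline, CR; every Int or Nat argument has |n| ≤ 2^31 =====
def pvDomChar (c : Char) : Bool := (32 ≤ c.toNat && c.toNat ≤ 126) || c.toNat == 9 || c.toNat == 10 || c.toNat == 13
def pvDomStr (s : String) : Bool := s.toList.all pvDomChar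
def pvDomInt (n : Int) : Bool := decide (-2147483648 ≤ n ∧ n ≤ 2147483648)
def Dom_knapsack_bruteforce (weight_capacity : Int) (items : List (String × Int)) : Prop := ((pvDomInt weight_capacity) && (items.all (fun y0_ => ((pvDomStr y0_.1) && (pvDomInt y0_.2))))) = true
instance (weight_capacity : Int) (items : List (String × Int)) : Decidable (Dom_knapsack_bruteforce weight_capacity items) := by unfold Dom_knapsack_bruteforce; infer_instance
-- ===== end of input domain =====

-- B drops the recursive powerset helper: it grows a list of (subset, weight) pairs in one
-- incremental pass over the reversed items, then filters and unzips (simpler decomposition; same cost).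

-- ===== PORT A =====
def powersetA (s : List (String × Int)) : List (List (String × Int)) :=
  match s with
  | [] => [[]]
  | first :: rest' =>
    let rest := powersetA rest'
    let with_first := rest.map (fun r => first :: r)
    rest ++ with_first

def knapsack_bruteforce (weight_capacity : Int) (items : List (String × Int)) : (List (List (String × Int))) × List Int :=
  (powersetA items).foldl (fun acc l =>
    let count := l.foldl (fun c item => c + item.2) 0
    if count ≤ weight_capacity ∧ count > 0 then (acc.1 ++ [l], acc.2 ++ [count]) else acc)
    ([], [])

-- ===== PORT B =====
def knapsack_bruteforce_alt (weight_capacity : Int) (items : List (String × Int)) : (List (List (String × Int))) × List Int :=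
  -- pairs = [([], 0)]; for (title,weight) in reversed(items): pairs = pairs + [prepend item, add weight]
  let pairs : List (List (String × Int) × Int) :=
    (items.reverse).foldl
      (fun pairs x => pairs ++ pairs.map (fun p => (x :: p.1, p.2 + x.2)))
      [([], 0)]
  let kept := pairs.filter (fun p => decide (0 < p.2 ∧ p.2 ≤ weight_capacity))
  (kept.map Prod.fst, kept.map Prod.snd)

-- ===== PRECONDITION & SPEC =====
def Spec_knapsack_bruteforce (weight_capacity : Int) (items : List (String × Int)) (out : (List (List (String × Int))) × List Int) : Prop := out = knapsack_bruteforce_alt weight_capacity items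
instance (weight_capacity : Int) (items : List (String × Int)) (out : (List (List (String × Int))) × List Int) : Decidable (Spec_knapsack_bruteforce weight_capacity items out) := by unfold Spec_knapsack_bruteforce; infer_instance

-- ===== CLAIM (what is proved, stated in full; the proofs are below) =====
def Claim_equal_knapsack_bruteforce : Prop := ∀ (weight_capacity : Int) (items : List (String × Int)), Dom_knapsack_bruteforce weight_capacity items → Spec_knapsack_bruteforce weight_capacity items (knapsack_bruteforce weight_capacity items)

-- ===== LEMMAS AND PROOFS =====

-- the (subset, weight) pair B carries for a subset l
def wpair (l : List (String × Int)) : List (String × Int) × Int := (l, (l.map Prod.snd).sum)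

-- B's incremental pass produces exactly A's powerset, each subset tagged with its weight
theorem pairs_eq (items : List (String × Int)) :
    (items.reverse).foldl
      (fun pairs x => pairs ++ pairs.map (fun p => (x :: p.1, p.2 + x.2)))
      [([], 0)]
    = (powersetA items).map wpair := by
  rw [List.foldl_reverse]
  induction items with
  | nil => simp [powersetA, wpair]
  | cons x xs ih =>
    simp only [List.foldr_cons, ih, powersetA, List.map_append, List.map_map]
    congr 1
    apply List.map_congr_left
    intro r _
    simp [wpair, Function.comp]
    ring

-- A's Python sums a subset's weights with a left fold from 0
theorem countA_eq (l : List (String × Int)) (c : Int) :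
    l.foldl (fun c item => c + item.2) c = c + (l.map Prod.snd).sum := by
  induction l generalizing c with
  | nil => simp
  | cons x xs ih => simp [List.foldl_cons, ih]; ring

-- folding the append-if-kept step over pairs = filter then unzip
theorem foldl_filter_unzip (w : Int) (ps : List (List (String × Int) × Int))
    (as : List (List (String × Int))) (bs : List Int) :
    ps.foldl (fun acc p => if p.2 ≤ w ∧ p.2 > 0 then (acc.1 ++ [p.1], acc.2 ++ [p.2]) else acc) (as, bs)
    = (as ++ (ps.filter (fun p => decide (0 < p.2 ∧ p.2 ≤ w))).map Prod.fst,
       bs ++ (ps.filter (fun p => decide (0 < p.2 ∧ p.2 ≤ w))).map Prod.snd) := by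
  induction ps generalizing as bs with
  | nil => simp
  | cons p ps ih =>
    simp only [List.foldl_cons, List.filter_cons]
    by_cases h : 0 < p.2 ∧ p.2 ≤ w
    · rw [if_pos ⟨h.2, h.1⟩]
      simp [h, ih]
    · rw [if_neg (fun hc => h ⟨hc.2, hc.1⟩)]
      simp [h, ih]

-- ===== VERDICT (by name: the statement is the Claim_ definition above) =====
theorem knapsack_bruteforce_spec : Claim_equal_knapsack_bruteforce := by
  intro w items _
  unfold Spec_knapsack_bruteforce knapsack_bruteforce knapsack_bruteforce_alt
  simp only [pairs_eq]
  rw [show ((((powersetA items).map wpair).filter (fun p => decide (0 < p.2 ∧ p.2 ≤ w))).map Prod.fst,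
        (((powersetA items).map wpair).filter (fun p => decide (0 < p.2 ∧ p.2 ≤ w))).map Prod.snd)
      = ((powersetA items).map wpair).foldl
          (fun acc p => if p.2 ≤ w ∧ p.2 > 0 then (acc.1 ++ [p.1], acc.2 ++ [p.2]) else acc) ([], [])
    from by rw [foldl_filter_unzip]; simp]
  rw [List.foldl_map]
  congr 1
  funext acc l
  simp only [wpair, countA_eq, zero_add]
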